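-- pv_equiv track=rewrite | github.com/kaartikn/twitter-tweaked-backend-django | backend/twitter_scrape/scrape.py | anyOfHashtagQueryBuilder
-- ===== SOURCE A (Python) =====
-- def anyOfHashtagQueryBuilder(wordList: list):
--     any_hashtag = ""
--     if (wordList != []):
--         any_hashtag = "("
--         list_length = len(wordList)
--         for idx, word in enumerate(wordList):
--             if(idx + 1 < list_length):
--                 any_hashtag += "#{word} OR ".format(word=word)
--             else:
--                 any_hashtag += "#{word}) ".format(word=word)
--     return any_hashtag
-- ===== SOURCE B (Python) =====
-- def anyOfHashtagQueryBuilder(wordList: list):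
--     if not wordList:
--         return ""
--     return "(" + " OR ".join("#{}".format(w) for w in wordList) + ") "
-- ===== Notes on version B (the rewrite author's own statement) =====
-- stated objective: idiomatic
-- what changed: Replaced the enumerate loop with its per-element last-index test by a map to '#word' tokens joined once with ' OR ', letting str.join place the separators.
import Mathlib
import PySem

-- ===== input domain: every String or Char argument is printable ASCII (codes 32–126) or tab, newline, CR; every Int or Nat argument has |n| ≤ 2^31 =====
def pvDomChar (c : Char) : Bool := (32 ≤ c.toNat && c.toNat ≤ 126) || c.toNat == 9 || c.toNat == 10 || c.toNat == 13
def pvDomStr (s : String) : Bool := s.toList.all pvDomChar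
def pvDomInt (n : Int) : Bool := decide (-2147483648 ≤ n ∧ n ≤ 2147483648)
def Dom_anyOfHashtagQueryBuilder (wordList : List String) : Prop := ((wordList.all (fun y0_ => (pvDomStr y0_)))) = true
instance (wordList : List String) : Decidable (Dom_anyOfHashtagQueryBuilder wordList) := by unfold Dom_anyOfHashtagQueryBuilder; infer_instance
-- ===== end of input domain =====

-- B replaces A's enumerate loop with its last-index branch by mapping to '#word' tokens
-- and joining them with " OR " (idiomatic; join places the separators).

-- ===== PORT A =====
-- literal transliteration: enumerate loop, branching on whether idx+1 < len(wordList)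
def anyOfHashtagQueryBuilder (wordList : List String) : String :=
  if wordList ≠ [] then
    let listLength : Int := wordList.length
    (PySem.List.enumerate wordList).foldl
      (fun acc p =>
        if p.1 + 1 < listLength then acc ++ "#" ++ p.2 ++ " OR "
        else acc ++ "#" ++ p.2 ++ ") ") "("
  else ""

-- ===== PORT B =====
-- literal transliteration of Source B: map to tokens, join with " OR ", wrap in "(" … ") "
def anyOfHashtagQueryBuilder_alt (wordList : List String) : String :=
  if wordList = [] then ""
  else "(" ++ PySem.Str.join " OR " (wordList.map (fun w => "#" ++ w)) ++ ") "

-- ===== PRECONDITION & SPEC =====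
def Spec_anyOfHashtagQueryBuilder (wordList : List String) (out : String) : Prop := out = anyOfHashtagQueryBuilder_alt wordList
instance (wordList : List String) (out : String) : Decidable (Spec_anyOfHashtagQueryBuilder wordList out) := by unfold Spec_anyOfHashtagQueryBuilder; infer_instance

-- ===== CLAIM (what is proved, stated in full; the proofs are below) =====
def Claim_equal_anyOfHashtagQueryBuilder : Prop := ∀ (wordList : List String), Dom_anyOfHashtagQueryBuilder wordList → Spec_anyOfHashtagQueryBuilder wordList (anyOfHashtagQueryBuilder wordList)

-- ===== LEMMAS AND PROOFS =====

theorem str_join_singleton (s a : String) : PySem.Str.join s [a] = a := by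
  apply String.toList_injective
  simp [PySem.Str.toList_join, PySem.Chars.join_singleton]

theorem str_join_cons_cons (s a b : String) (l : List String) :
    PySem.Str.join s (a :: b :: l) = a ++ s ++ PySem.Str.join s (b :: l) := by
  apply String.toList_injective
  simp [PySem.Str.toList_join, PySem.Chars.join_cons_cons]

-- A's loop over `enumerate (w :: ws) i`, with the length test phrased against
-- the final index `i + ws.length`, produces acc ++ the joined tokens ++ ") ".
theorem loopA_eq_join : ∀ (ws : List String) (w : String) (i : Int) (acc : String),
    (PySem.List.enumerate (w :: ws) i).foldl
      (fun acc p =>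
        if p.1 + 1 < i + (ws.length : Int) + 1 then acc ++ "#" ++ p.2 ++ " OR "
        else acc ++ "#" ++ p.2 ++ ") ") acc
    = acc ++ PySem.Str.join " OR " ((w :: ws).map (fun w => "#" ++ w)) ++ ") " := by
  intro ws
  induction ws with
  | nil =>
    intro w i acc
    simp [PySem.List.enumerate_cons, PySem.List.enumerate_nil, str_join_singleton,
      String.append_assoc]
  | cons w' ws' ih =>
    intro w i acc
    have hlen : i + ((w' :: ws').length : Int) + 1 = (i + 1) + (ws'.length : Int) + 1 := by
      push_cast [List.length_cons]; omega
    rw [PySem.List.enumerate_cons, List.foldl_cons, hlen]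
    have hc : i + 1 < (i + 1) + (ws'.length : Int) + 1 := by omega
    rw [if_pos hc, ih w' (i + 1) (acc ++ "#" ++ w ++ " OR ")]
    simp only [List.map_cons]
    rw [str_join_cons_cons]
    simp [String.append_assoc]

-- ===== VERDICT (by name: the statement is the Claim_ definition above) =====
theorem anyOfHashtagQueryBuilder_spec : Claim_equal_anyOfHashtagQueryBuilder := by
  unfold Claim_equal_anyOfHashtagQueryBuilder
  intro wordList _
  unfold Spec_anyOfHashtagQueryBuilder anyOfHashtagQueryBuilder anyOfHashtagQueryBuilder_alt
  cases wordList with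
  | nil => simp
  | cons w ws =>
    simp only [ne_eq, reduceCtorEq, not_false_eq_true, if_true, if_neg]
    have h := loopA_eq_join ws w 0 "("
    have hlen : ((w :: ws).length : Int) = 0 + (ws.length : Int) + 1 := by push_cast [List.length_cons]; omega
    rw [hlen]
    simpa using h
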